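-- pv_equiv track=rewrite | github.com/alfasocialmedia/autonews | app/worker.py | _matches_keyword_filter
-- ===== SOURCE A (Python) =====
-- def _matches_keyword_filter(keyword_filter: str | None, title: str, body: str = "") -> bool:
--     """Devuelve True si el artículo pasa el filtro de palabras clave (o si no hay filtro)."""
--     if not keyword_filter:
--         return True
--     haystack = (title + " " + body).lower()
--     for kw in keyword_filter.split(","):
--         kw = kw.strip()
--         if kw and kw in haystack:
--             return True
--     return False
-- ===== SOURCE B (Python) =====
-- def _matches_keyword_filter(keyword_filter: str | None, title: str, body: str = "") -> bool:
--     """True si el articulo pasa el filtro de palabras clave (o si no hay filtro)."""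
--     if not keyword_filter:
--         return True
--     haystack = (title + " " + body).lower()
--     kws = [kw.strip() for kw in keyword_filter.split(",")]
--     kws = [kw for kw in kws if kw]
--     # single position-major scan: at each position, is some keyword a prefix there?
--     return any(haystack.startswith(kw, i) for i in range(len(haystack)) for kw in kws)
-- ===== Notes on version B (the rewrite author's own statement) =====
-- stated objective: alternative
-- what changed: B strips and filters the keywords once up front and then does a single position-major scan of the haystack, testing every keyword as a prefix at each position, instead of A's keyword-major loop with one independent substring scan (and strip) per keyword and early return.
import Mathlib
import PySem

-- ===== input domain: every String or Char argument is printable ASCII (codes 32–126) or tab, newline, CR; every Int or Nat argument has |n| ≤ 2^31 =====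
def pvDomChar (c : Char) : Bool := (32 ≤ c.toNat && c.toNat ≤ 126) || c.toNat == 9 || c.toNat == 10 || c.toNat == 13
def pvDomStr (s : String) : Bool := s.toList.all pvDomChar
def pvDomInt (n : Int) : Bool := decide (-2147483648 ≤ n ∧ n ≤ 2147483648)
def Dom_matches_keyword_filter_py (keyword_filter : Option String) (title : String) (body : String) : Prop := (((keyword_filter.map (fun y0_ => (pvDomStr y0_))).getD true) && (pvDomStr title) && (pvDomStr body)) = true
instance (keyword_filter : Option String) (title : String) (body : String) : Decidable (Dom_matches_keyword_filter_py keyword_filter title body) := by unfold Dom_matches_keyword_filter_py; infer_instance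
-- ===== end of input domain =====

-- B is an alternative implementation: keywords stripped/filtered once, then one position-major scan of the haystack (prefix test per position) instead of A's per-keyword substring scans; same cost, not claimed faster.

-- ===== PORT A =====
def pvLoopA (hay : String) : List String → Bool
  | [] => false
  | kw0 :: rest =>
    let kw := PySem.Str.strip kw0
    if kw ≠ "" && PySem.Str.isIn kw hay then true else pvLoopA hay rest

def matches_keyword_filter_py (keyword_filter : Option String) (title : String) (body : String) : Bool :=
  match keyword_filter with
  | none => true
  | some f =>
    if f = "" then true
    else pvLoopA (PySem.Str.lower (title ++ " " ++ body)) ((PySem.Str.split? f ",").getD [])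

-- ===== PORT B =====
-- str.startswith(kw, i) with 0 ≤ i is exactly a prefix test on hay[i:]
def pvStartsAt (hay kw : String) (i : Int) : Bool :=
  PySem.Str.startswith (PySem.Str.slice hay (some i) none) kw

def matches_keyword_filter_py_alt (keyword_filter : Option String) (title : String) (body : String) : Bool :=
  match keyword_filter with
  | none => true
  | some f =>
    if f = "" then true
    else
      let haystack := PySem.Str.lower (title ++ " " ++ body)
      let kws := ((((PySem.Str.split? f ",").getD []).map PySem.Str.strip).filter (fun kw => kw ≠ ""))
      (PySem.List.pyRange 0 (PySem.Str.len haystack) 1).any (fun i => kws.any (fun kw => pvStartsAt haystack kw i))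

-- ===== PRECONDITION & SPEC =====
def Spec_matches_keyword_filter_py (keyword_filter : Option String) (title : String) (body : String) (out : Bool) : Prop := out = matches_keyword_filter_py_alt keyword_filter title body
instance (keyword_filter : Option String) (title : String) (body : String) (out : Bool) : Decidable (Spec_matches_keyword_filter_py keyword_filter title body out) := by unfold Spec_matches_keyword_filter_py; infer_instance

-- ===== CLAIM (what is proved, stated in full; the proofs are below) =====
def Claim_equal_matches_keyword_filter_py : Prop := ∀ (keyword_filter : Option String) (title : String) (body : String), Dom_matches_keyword_filter_py keyword_filter title body → Spec_matches_keyword_filter_py keyword_filter title body (matches_keyword_filter_py keyword_filter title body)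

-- ===== LEMMAS AND PROOFS =====

theorem pvLoopA_eq_any (hay : String) (ks : List String) :
    pvLoopA hay ks = ks.any (fun kw0 => PySem.Str.strip kw0 ≠ "" && PySem.Str.isIn (PySem.Str.strip kw0) hay) := by
  induction ks with
  | nil => rfl
  | cons k rest ih =>
    rw [List.any_cons, ← ih]
    simp only [pvLoopA]
    split_ifs with h
    · rw [h, Bool.true_or]
    · rw [Bool.not_eq_true] at h
      rw [h, Bool.false_or]

theorem pvAny_swap {α β : Type} (l : List α) (m : List β) (f : α → β → Bool) :
    l.any (fun a => m.any (fun b => f a b)) = m.any (fun b => l.any (fun a => f a b)) := by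
  rcases hl : l.any (fun a => m.any (fun b => f a b)) with _ | _
  · symm; rw [List.any_eq_false] at hl ⊢
    intro b hb
    simp only [List.any_eq_true, not_exists, not_and, Bool.not_eq_true] at hl ⊢
    intro a ha
    exact hl a ha b hb
  · symm
    rw [List.any_eq_true] at hl ⊢
    obtain ⟨a, ha, hm⟩ := hl
    rw [List.any_eq_true] at hm
    obtain ⟨b, hb, hf⟩ := hm
    exact ⟨b, hb, List.any_eq_true.2 ⟨a, ha, hf⟩⟩

theorem pvScan_eq_isIn (hay kw : String) (hkw : kw ≠ "") :
    ((PySem.List.pyRange 0 (PySem.Str.len hay) 1).any (fun i => pvStartsAt hay kw i))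
      = PySem.Str.isIn kw hay := by
  rcases h : PySem.Str.isIn kw hay with _ | _
  · -- hay does not contain kw: no position can have it as a prefix
    rw [List.any_eq_false]
    intro i hi
    rcases (PySem.List.mem_pyRange_one).1 hi with ⟨h0, _⟩
    simp only [pvStartsAt, Bool.not_eq_true]
    rw [PySem.Str.startswith_eq]
    rw [Bool.eq_false_iff]
    intro hpre
    rw [PySem.Chars.startswith, List.isPrefixOf_iff_prefix] at hpre
    have : ∃ j, kw.toList <+: List.drop j hay.toList := by
      refine ⟨i.toNat, ?_⟩
      have hsl : (PySem.Str.slice hay (some i) none).toList = hay.toList.drop i.toNat := by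
        rw [PySem.Str.toList_slice]; exact PySem.List.slice_from _ h0
      rwa [hsl] at hpre
    rw [PySem.Chars.exists_prefix_drop_iff_isIn] at this
    rw [PySem.Str.isIn_eq] at h
    exact absurd this (by simp [h])
  · -- hay contains kw at some position j < len hay
    rw [PySem.Str.isIn_eq] at h
    rw [← PySem.Chars.exists_prefix_drop_iff_isIn] at h
    obtain ⟨j, hj⟩ := h
    have hkl : kw.toList ≠ [] := by
      intro hc; exact hkw (by cases kw; simp_all)
    have hjlt : j < hay.toList.length := by
      by_contra hge
      rw [List.drop_eq_nil_of_le (by omega)] at hj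
      exact hkl (List.prefix_nil.1 hj)
    rw [List.any_eq_true]
    refine ⟨(j : Int), ?_, ?_⟩
    · rw [PySem.List.mem_pyRange_one]
      constructor
      · exact Int.natCast_nonneg j
      · have : PySem.Str.len hay = (hay.toList.length : Int) := by
          simp [PySem.Str.len]
        omega
    · simp only [pvStartsAt]
      rw [PySem.Str.startswith_eq, PySem.Chars.startswith, List.isPrefixOf_iff_prefix]
      have hsl : (PySem.Str.slice hay (some (j : Int)) none).toList = hay.toList.drop j := by
        rw [PySem.Str.toList_slice]; exact PySem.List.slice_from_natCast _ j
      rw [hsl]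
      exact hj

-- ===== VERDICT (by name: the statement is the Claim_ definition above) =====
theorem matches_keyword_filter_py_spec : Claim_equal_matches_keyword_filter_py := by
  intro kf title body _
  unfold Spec_matches_keyword_filter_py matches_keyword_filter_py matches_keyword_filter_py_alt
  cases kf with
  | none => rfl
  | some f =>
    by_cases hf : f = ""
    · simp [hf]
    · simp only [hf, if_false]
      rw [pvLoopA_eq_any]
      rw [pvAny_swap]
      rw [List.any_filter, List.any_map]
      apply PySem.List.any_congr_mem
      intro kw0 _
      simp only [Function.comp]
      by_cases hk : PySem.Str.strip kw0 = ""
      · simp [hk]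
      · simp only [hk, ne_eq, not_false_eq_true, decide_true, Bool.true_and]
        rw [pvScan_eq_isIn _ _ hk]
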